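-- pv_equiv track=rewrite | github.com/Haksell/codeforces | 1913B.py | solve
-- ===== SOURCE A (Python) =====
-- def solve(s):
--     b0 = b1 = 0
--     n0 = s.count("0")
--     n1 = s.count("1")
--     res = len(s)
--     for i, c in enumerate(s):
--         b0 += c == "0"
--         b1 += c == "1"
--         if n0 >= b1 and n1 >= b0:
--             res = len(s) - i - 1
--     return res
-- ===== SOURCE B (Python) =====
-- def solve(s):
--     n0 = s.count("0")
--     n1 = s.count("1")
--     if n0 == n1:
--         return 0
--     target, k = ("1", n0 + 1) if n1 > n0 else ("0", n1 + 1)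
--     seen = 0
--     for i, c in enumerate(s):
--         if c == target:
--             seen += 1
--             if seen == k:
--                 return len(s) - i
--     return 0
-- ===== Notes on version B (the rewrite author's own statement) =====
-- stated objective: faster
-- what changed: A maintains running 0/1 balances and keeps overwriting a suffix-length candidate at every index where the balance condition still holds; B first counts the two digits with str.count, returns 0 when they are equal, and otherwise scans once for the k-th occurrence of the single limiting character (k = min count + 1), returning len(s) minus its index.
import Mathlib
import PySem

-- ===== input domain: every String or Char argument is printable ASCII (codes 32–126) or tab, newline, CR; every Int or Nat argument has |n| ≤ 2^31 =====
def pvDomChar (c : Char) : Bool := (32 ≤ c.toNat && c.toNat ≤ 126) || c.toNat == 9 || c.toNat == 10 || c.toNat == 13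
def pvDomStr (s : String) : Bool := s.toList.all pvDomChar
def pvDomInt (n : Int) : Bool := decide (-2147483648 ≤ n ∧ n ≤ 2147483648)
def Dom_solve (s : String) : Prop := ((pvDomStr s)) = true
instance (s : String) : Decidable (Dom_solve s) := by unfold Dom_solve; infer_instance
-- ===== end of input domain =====

-- B replaces A's three-counter balance scan by a count-then-find-kth-occurrence decomposition (same return value; no mutation).


-- ===== PORT A =====
-- body of A's for-loop: b0 += c=='0'; b1 += c=='1'; if n0>=b1 and n1>=b0: res = n-i-1
def aStep (n0 n1 n : Int) (st : Int × Int × Int) (ic : Int × Char) : Int × Int × Int :=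
  let b0 := st.1 + (if ic.2 == '0' then (1 : Int) else 0)
  let b1 := st.2.1 + (if ic.2 == '1' then (1 : Int) else 0)
  if n0 ≥ b1 ∧ n1 ≥ b0 then (b0, b1, n - ic.1 - 1) else (b0, b1, st.2.2)

def solve (s : String) : Int :=
  let n0 : Int := PySem.Str.count s "0"
  let n1 : Int := PySem.Str.count s "1"
  let n : Int := PySem.Str.len s
  ((PySem.List.enumerate s.toList).foldl (aStep n0 n1 n) (0, 0, n)).2.2

-- ===== PORT B =====
-- B's scan: return n - i upon the k-th occurrence of the target character (0 if it never comes)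
def altGo (n k : Int) (t : Char) : List Char → Int → Int → Int
  | [], _, _ => 0
  | c :: cs, i, seen =>
    if c == t then
      (if seen + 1 == k then n - i else altGo n k t cs (i + 1) (seen + 1))
    else altGo n k t cs (i + 1) seen

def solve_alt (s : String) : Int :=
  let n0 : Int := PySem.Str.count s "0"
  let n1 : Int := PySem.Str.count s "1"
  if n0 == n1 then 0
  else
    let tk : Char × Int := if n1 > n0 then ('1', n0 + 1) else ('0', n1 + 1)
    altGo (PySem.Str.len s) tk.2 tk.1 s.toList 0 0

-- ===== PRECONDITION & SPEC =====
def Spec_solve (s : String) (out : Int) : Prop := out = solve_alt s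
instance (s : String) (out : Int) : Decidable (Spec_solve s out) := by unfold Spec_solve; infer_instance

-- ===== CLAIM (what is proved, stated in full; the proofs are below) =====
def Claim_equal_solve : Prop := ∀ (s : String), Dom_solve s → Spec_solve s (solve s)

-- ===== LEMMAS AND PROOFS =====

-- PySem.Chars.count with a one-character needle is List.count
lemma count_go_single (c : Char) (l : List Char) : ∀ (fuel acc : Nat), l.length ≤ fuel →
    PySem.Chars.count.go [c] fuel l acc = acc + l.count c := by
  induction l with
  | nil => intro fuel acc _; cases fuel <;> simp [PySem.Chars.count.go]
  | cons h t ih =>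
    intro fuel acc hf
    cases fuel with
    | zero => simp at hf
    | succ f =>
      by_cases hc : h = c
      · subst hc
        have hp : List.isPrefixOf [h] (h :: t) = true := by simp [List.isPrefixOf]
        simp only [PySem.Chars.count.go, hp, if_true, List.length_cons, List.length_nil,
          List.drop_succ_cons, List.drop_zero]
        rw [ih f (acc + 1) (by simpa using hf)]
        simp; omega
      · have hp : List.isPrefixOf [c] (h :: t) = false := by simp [List.isPrefixOf, Ne.symm hc]
        simp only [PySem.Chars.count.go, hp, Bool.false_eq_true, if_false]
        rw [ih f acc (by simpa using hf)]
        simp [hc]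

lemma count_single (c : Char) (l : List Char) : PySem.Chars.count l [c] = l.count c := by
  simpa using count_go_single c l l.length 0 le_rfl

-- once b1 has passed n0, A's loop never touches res again
lemma dead1 (n0 n1 n : Int) (l : List Char) : ∀ (i b0 b1 res : Int), n0 < b1 →
    ((PySem.List.enumerate l i).foldl (aStep n0 n1 n) (b0, b1, res)).2.2 = res := by
  induction l with
  | nil => intro i b0 b1 res _; simp [PySem.List.enumerate_nil]
  | cons c cs ih =>
    intro i b0 b1 res h
    rw [PySem.List.enumerate_cons, List.foldl_cons]
    have hb : b1 ≤ b1 + (if c == '1' then (1 : Int) else 0) := by split <;> omega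
    simp only [aStep]
    rw [if_neg (by intro hcon; omega)]
    exact ih _ _ _ _ (by omega)

-- once b0 has passed n1, A's loop never touches res again
lemma dead0 (n0 n1 n : Int) (l : List Char) : ∀ (i b0 b1 res : Int), n1 < b0 →
    ((PySem.List.enumerate l i).foldl (aStep n0 n1 n) (b0, b1, res)).2.2 = res := by
  induction l with
  | nil => intro i b0 b1 res _; simp [PySem.List.enumerate_nil]
  | cons c cs ih =>
    intro i b0 b1 res h
    rw [PySem.List.enumerate_cons, List.foldl_cons]
    have hb : b0 ≤ b0 + (if c == '0' then (1 : Int) else 0) := by split <;> omega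
    simp only [aStep]
    rw [if_neg (by intro _; omega)]
    exact ih _ _ _ _ (by omega)

-- case n1 > n0: A's loop computes B's scan for the (n0+1)-th '1'
lemma runA_gt (n0 n1 n : Int) (hlt : n0 < n1) (l : List Char) :
    ∀ (i b0 b1 res : Int),
      b0 + (l.count '0' : Int) = n0 → b1 + (l.count '1' : Int) = n1 →
      i + (l.length : Int) = n → res = n - i → b1 ≤ n0 →
      ((PySem.List.enumerate l i).foldl (aStep n0 n1 n) (b0, b1, res)).2.2
        = altGo n (n0 + 1) '1' l i b1 := by
  induction l with
  | nil => intro i b0 b1 res _ hb1 _ _ hle; simp at hb1; omega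
  | cons c cs ih =>
    intro i b0 b1 res hb0 hb1 hi hres hle
    rw [PySem.List.enumerate_cons, List.foldl_cons]
    simp only [List.count_cons, List.length_cons] at hb0 hb1 hi
    have hb0' : b0 ≤ n0 := by push_cast at hb0; split at hb0 <;> omega
    by_cases hc1 : c = '1'
    · subst hc1
      simp only [aStep, altGo, if_pos (by rfl : ('1' == '1') = true)]
      have h0 : ('1' == '0') = false := by decide
      simp only [h0, Bool.false_eq_true, if_false, add_zero]
      have hb1c : b1 + (cs.count '1' : Int) + 1 = n1 := by
        simp at hb1; omega
      have hb0c : b0 + (cs.count '0' : Int) = n0 := by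
        simp at hb0; omega
      by_cases hk : b1 = n0
      · -- the (n0+1)-th '1': A stops updating res, B returns n - i
        rw [if_neg (by intro hcon; omega)]
        rw [dead1 n0 n1 n cs _ _ _ _ (by omega)]
        rw [if_pos (by simp [hk])]
        omega
      · rw [if_pos ⟨by omega, by omega⟩]
        rw [if_neg (by simp; omega)]
        exact ih _ _ _ _ (by omega) (by omega) (by omega) (by omega) (by omega)
    · have hne : (c == '1') = false := by simp [hc1]
      simp only [aStep, altGo, hne, Bool.false_eq_true, if_false, add_zero]
      have hb1c : b1 + (cs.count '1' : Int) = n1 := by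
        simp [hc1] at hb1; omega
      by_cases hc0 : c = '0'
      · subst hc0
        have hb0c : b0 + (cs.count '0' : Int) + 1 = n0 := by
          simp at hb0; omega
        simp only [if_pos (by rfl : ('0' == '0') = true)]
        rw [if_pos ⟨by omega, by omega⟩]
        exact ih _ _ _ _ (by omega) (by omega) (by omega) (by omega) hle
      · have hne0 : (c == '0') = false := by simp [hc0]
        have hb0c : b0 + (cs.count '0' : Int) = n0 := by
          simp [hc0] at hb0; omega
        simp only [hne0, Bool.false_eq_true, if_false, add_zero]
        rw [if_pos ⟨by omega, by omega⟩]
        exact ih _ _ _ _ (by omega) (by omega) (by omega) (by omega) hle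

-- case n0 > n1: A's loop computes B's scan for the (n1+1)-th '0'
lemma runA_lt (n0 n1 n : Int) (hlt : n1 < n0) (l : List Char) :
    ∀ (i b0 b1 res : Int),
      b0 + (l.count '0' : Int) = n0 → b1 + (l.count '1' : Int) = n1 →
      i + (l.length : Int) = n → res = n - i → b0 ≤ n1 →
      ((PySem.List.enumerate l i).foldl (aStep n0 n1 n) (b0, b1, res)).2.2
        = altGo n (n1 + 1) '0' l i b0 := by
  induction l with
  | nil => intro i b0 b1 res hb0 _ _ _ hle; simp at hb0; omega
  | cons c cs ih =>
    intro i b0 b1 res hb0 hb1 hi hres hle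
    rw [PySem.List.enumerate_cons, List.foldl_cons]
    simp only [List.count_cons, List.length_cons] at hb0 hb1 hi
    have hb1' : b1 ≤ n1 := by push_cast at hb1; split at hb1 <;> omega
    by_cases hc0 : c = '0'
    · subst hc0
      simp only [aStep, altGo, if_pos (by rfl : ('0' == '0') = true)]
      have h1 : ('0' == '1') = false := by decide
      simp only [h1, Bool.false_eq_true, if_false, add_zero]
      have hb0c : b0 + (cs.count '0' : Int) + 1 = n0 := by
        simp at hb0; omega
      have hb1c : b1 + (cs.count '1' : Int) = n1 := by
        simp at hb1; omega
      by_cases hk : b0 = n1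
      · rw [if_neg (by intro _; omega)]
        rw [dead0 n0 n1 n cs _ _ _ _ (by omega)]
        rw [if_pos (by simp [hk])]
        omega
      · rw [if_pos ⟨by omega, by omega⟩]
        rw [if_neg (by simp; omega)]
        exact ih _ _ _ _ (by omega) (by omega) (by omega) (by omega) (by omega)
    · have hne : (c == '0') = false := by simp [hc0]
      simp only [aStep, altGo, hne, Bool.false_eq_true, if_false, add_zero]
      have hb0c : b0 + (cs.count '0' : Int) = n0 := by
        simp [hc0] at hb0; omega
      by_cases hc1 : c = '1'
      · subst hc1
        have hb1c : b1 + (cs.count '1' : Int) + 1 = n1 := by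
          simp at hb1; omega
        simp only [if_pos (by rfl : ('1' == '1') = true)]
        rw [if_pos ⟨by omega, by omega⟩]
        exact ih _ _ _ _ (by omega) (by omega) (by omega) (by omega) hle
      · have hne1 : (c == '1') = false := by simp [hc1]
        have hb1c : b1 + (cs.count '1' : Int) = n1 := by
          simp [hc1] at hb1; omega
        simp only [hne1, Bool.false_eq_true, if_false, add_zero]
        rw [if_pos ⟨by omega, by omega⟩]
        exact ih _ _ _ _ (by omega) (by omega) (by omega) (by omega) hle

-- case n0 = n1: the condition always holds, so A ends with res = n - len = 0
lemma runA_eq (n0 n1 n : Int) (heq : n0 = n1) (l : List Char) :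
    ∀ (i b0 b1 res : Int),
      b0 + (l.count '0' : Int) = n0 → b1 + (l.count '1' : Int) = n1 →
      i + (l.length : Int) = n → res = n - i →
      ((PySem.List.enumerate l i).foldl (aStep n0 n1 n) (b0, b1, res)).2.2 = 0 := by
  induction l with
  | nil =>
    intro i b0 b1 res _ _ hi hres
    simp only [PySem.List.enumerate_nil, List.foldl_nil]
    simp at hi; omega
  | cons c cs ih =>
    intro i b0 b1 res hb0 hb1 hi hres
    rw [PySem.List.enumerate_cons, List.foldl_cons]
    simp only [List.count_cons, List.length_cons] at hb0 hb1 hi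
    have e0 : (if c == '0' then (1 : Int) else 0) = if c = '0' then 1 else 0 := by
      split <;> simp_all
    have e1 : (if c == '1' then (1 : Int) else 0) = if c = '1' then 1 else 0 := by
      split <;> simp_all
    have hcnt0 : (0 : Int) ≤ (cs.count '0' : Int) := by positivity
    have hcnt1 : (0 : Int) ≤ (cs.count '1' : Int) := by positivity
    simp only [aStep, e0, e1]
    set u : Int := if c = '0' then 1 else 0 with hu
    set v : Int := if c = '1' then 1 else 0 with hv
    have hb0c : b0 + u + (cs.count '0' : Int) = n0 := by
      rw [hu]; push_cast at hb0; split at hb0 <;> split <;> simp_all; omega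
    have hb1c : b1 + v + (cs.count '1' : Int) = n1 := by
      rw [hv]; push_cast at hb1; split at hb1 <;> split <;> simp_all; omega
    rw [if_pos ⟨by omega, by omega⟩]
    exact ih _ _ _ _ (by omega) (by omega) (by omega) (by omega)

-- ===== VERDICT (by name: the statement is the Claim_ definition above) =====
theorem solve_spec : Claim_equal_solve := by
  intro s _
  unfold Spec_solve solve solve_alt
  have hc0 : PySem.Str.count s "0" = s.toList.count '0' := by
    rw [PySem.Str.count_eq]; exact count_single '0' s.toList
  have hc1 : PySem.Str.count s "1" = s.toList.count '1' := by
    rw [PySem.Str.count_eq]; exact count_single '1' s.toList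
  simp only [hc0, hc1, PySem.Str.len_eq]
  set l := s.toList with hl
  rcases lt_trichotomy (l.count '0') (l.count '1') with h | h | h
  · rw [if_neg (by simp; omega)]
    rw [if_pos (by exact_mod_cast h)]
    exact runA_gt _ _ _ (by exact_mod_cast h) l 0 0 0 _ (by simp) (by simp) (by simp)
      (by simp) (by positivity)
  · rw [if_pos (by simp [h])]
    exact runA_eq _ _ _ (by exact_mod_cast h) l 0 0 0 _ (by simp) (by simp) (by simp) (by simp)
  · rw [if_neg (by simp; omega)]
    rw [if_neg (by simp; exact_mod_cast h.le)]
    exact runA_lt _ _ _ (by exact_mod_cast h) l 0 0 0 _ (by simp) (by simp) (by simp)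
      (by simp) (by positivity)
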